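-- pv_equiv track=rewrite | github.com/kseenyoung/programmers | kwAlgorithmClass/level0/옹알이(1).py | solution
-- ===== SOURCE A (Python) =====
-- def solution(babbling):
--     result = ['aya', 'ye', 'woo', 'ma']
--     answer = 0
--     for bab in babbling:
--         tempbab = bab
--         i=0
--         while tempbab != '':
--             if tempbab[:3] == 'aya': #aya
--                 tempbab = tempbab[3:]
--             elif tempbab[:2] == 'ye': #ye
--                 tempbab = tempbab[2:]
--             elif tempbab[:3] == 'woo': #woo
--                 tempbab = tempbab[3:]
--             elif tempbab[:2] == 'ma': #ma
--                 tempbab = tempbab[2:]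
--             else:
--                 break
--         if tempbab == '':
--             answer += 1
--     return answer
-- ===== SOURCE B (Python) =====
-- def solution(babbling):
--     # Greedy index-pointer scan per word; no repeated suffix slicing.
--     def ok(w):
--         i, n = 0, len(w)
--         while i < n:
--             if w.startswith('aya', i):
--                 i += 3
--             elif w.startswith('ye', i):
--                 i += 2
--             elif w.startswith('woo', i):
--                 i += 3
--             elif w.startswith('ma', i):
--                 i += 2
--             else:
--                 return False
--         return True
--     return sum(1 for w in babbling if ok(w))
-- ===== Notes on version B (the rewrite author's own statement) =====
-- stated objective: alternative
-- what changed: Replaces A's repeated whole-suffix slicing loop (tempbab = tempbab[k:]) by a greedy index-pointer scan per word using str.startswith(tok, i); it avoids the quadratic suffix copying but was not measurably faster on the generated inputs.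
import Mathlib
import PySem

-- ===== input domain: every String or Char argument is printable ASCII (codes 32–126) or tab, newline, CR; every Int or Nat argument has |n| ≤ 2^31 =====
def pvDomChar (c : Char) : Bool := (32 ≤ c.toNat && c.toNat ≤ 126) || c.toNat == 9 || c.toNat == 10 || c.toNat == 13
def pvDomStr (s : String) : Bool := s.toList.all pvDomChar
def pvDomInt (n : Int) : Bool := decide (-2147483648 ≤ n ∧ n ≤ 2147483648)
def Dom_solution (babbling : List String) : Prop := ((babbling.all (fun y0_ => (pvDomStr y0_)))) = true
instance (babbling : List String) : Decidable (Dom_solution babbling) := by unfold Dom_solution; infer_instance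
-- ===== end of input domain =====

-- B replaces A's repeated whole-suffix slicing by a greedy index-pointer scan per word (objective: alternative).

-- ===== PORT A =====
-- A's while loop: repeatedly slice tempbab[:k] and compare, then keep tempbab[k:].
def ayaWhileA (s : List Char) : List Char :=
  if s = [] then s
  else if s.take 3 = ['a','y','a'] then ayaWhileA (s.drop 3)
  else if s.take 2 = ['y','e'] then ayaWhileA (s.drop 2)
  else if s.take 3 = ['w','o','o'] then ayaWhileA (s.drop 3)
  else if s.take 2 = ['m','a'] then ayaWhileA (s.drop 2)
  else s
termination_by s.length
decreasing_by
  all_goals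
    simp only [List.length_drop]
    have hlen : s.length ≠ 0 := by simpa using ‹¬ s = []›
    omega

def solution (babbling : List String) : Int :=
  babbling.foldl
    (fun answer bab =>
      if ayaWhileA bab.toList = [] then answer + 1 else answer) 0

-- ===== PORT B =====
-- B's per-word loop: fixed word w, index pointer i, w.startswith(tok, i).
def okB (w : List Char) (i : Nat) : Bool :=
  if i < w.length then
    if ['a','y','a'].isPrefixOf (w.drop i) then okB w (i+3)
    else if ['y','e'].isPrefixOf (w.drop i) then okB w (i+2)
    else if ['w','o','o'].isPrefixOf (w.drop i) then okB w (i+3)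
    else if ['m','a'].isPrefixOf (w.drop i) then okB w (i+2)
    else false
  else true
termination_by w.length - i

def solution_alt (babbling : List String) : Int :=
  ((babbling.countP (fun w => okB w.toList 0)) : Int)

-- ===== PRECONDITION & SPEC =====
def Spec_solution (babbling : List String) (out : Int) : Prop := out = solution_alt babbling
instance (babbling : List String) (out : Int) : Decidable (Spec_solution babbling out) := by unfold Spec_solution; infer_instance

-- ===== CLAIM (what is proved, stated in full; the proofs are below) =====
def Claim_equal_solution : Prop := ∀ (babbling : List String), Dom_solution babbling → Spec_solution babbling (solution babbling)

-- ===== LEMMAS AND PROOFS =====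
theorem okB_eq_ayaWhileA (w : List Char) (i : Nat) :
    okB w i = decide (ayaWhileA (w.drop i) = []) := by
  fun_induction okB w i with
  | case1 i h1 h2 ih =>
      rw [ih]
      have hpre : ['a','y','a'] <+: (w.drop i) := by
        simpa [List.isPrefixOf_iff_prefix] using h2
      have htake : (w.drop i).take 3 = ['a','y','a'] :=
        (List.prefix_iff_eq_take.mp hpre).symm
      have hne : w.drop i ≠ [] := by
        intro h; rw [h] at hpre; simp at hpre
      conv_rhs => rw [ayaWhileA]
      simp [hne, htake, List.drop_drop]
  | case2 i h1 h2 h3 ih =>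
      rw [ih]
      have hpre : ['y','e'] <+: (w.drop i) := by
        simpa [List.isPrefixOf_iff_prefix] using h3
      have htake : (w.drop i).take 2 = ['y','e'] :=
        (List.prefix_iff_eq_take.mp hpre).symm
      have hne : w.drop i ≠ [] := by
        intro h; rw [h] at hpre; simp at hpre
      have hnot3 : (w.drop i).take 3 ≠ ['a','y','a'] := by
        intro h
        apply h2
        rw [List.isPrefixOf_iff_prefix]
        exact h ▸ List.take_prefix 3 (w.drop i)
      conv_rhs => rw [ayaWhileA]
      simp [hne, htake, hnot3, List.drop_drop]
  | case3 i h1 h2 h3 h4 ih =>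
      rw [ih]
      have hpre : ['w','o','o'] <+: (w.drop i) := by
        simpa [List.isPrefixOf_iff_prefix] using h4
      have htake : (w.drop i).take 3 = ['w','o','o'] :=
        (List.prefix_iff_eq_take.mp hpre).symm
      have hne : w.drop i ≠ [] := by
        intro h; rw [h] at hpre; simp at hpre
      have hnot2 : (w.drop i).take 2 ≠ ['y','e'] := by
        intro h
        apply h3
        rw [List.isPrefixOf_iff_prefix]
        exact h ▸ List.take_prefix 2 (w.drop i)
      conv_rhs => rw [ayaWhileA]
      simp [hne, htake, hnot2, List.drop_drop]
  | case4 i h1 h2 h3 h4 h5 ih =>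
      rw [ih]
      have hpre : ['m','a'] <+: (w.drop i) := by
        simpa [List.isPrefixOf_iff_prefix] using h5
      have htake : (w.drop i).take 2 = ['m','a'] :=
        (List.prefix_iff_eq_take.mp hpre).symm
      have hne : w.drop i ≠ [] := by
        intro h; rw [h] at hpre; simp at hpre
      have hnot3a : (w.drop i).take 3 ≠ ['a','y','a'] := by
        intro h; apply h2; rw [List.isPrefixOf_iff_prefix]
        exact h ▸ List.take_prefix 3 (w.drop i)
      have hnot2 : (w.drop i).take 2 ≠ ['y','e'] := by
        intro h; apply h3; rw [List.isPrefixOf_iff_prefix]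
        exact h ▸ List.take_prefix 2 (w.drop i)
      have hnot3w : (w.drop i).take 3 ≠ ['w','o','o'] := by
        intro h; apply h4; rw [List.isPrefixOf_iff_prefix]
        exact h ▸ List.take_prefix 3 (w.drop i)
      conv_rhs => rw [ayaWhileA]
      simp [hne, htake, hnot3a, hnot3w, List.drop_drop]
  | case5 i h1 h2 h3 h4 h5 =>
      have hne : w.drop i ≠ [] := by
        simp only [ne_eq, List.drop_eq_nil_iff]; omega
      have hnot3a : (w.drop i).take 3 ≠ ['a','y','a'] := by
        intro h; apply h2; rw [List.isPrefixOf_iff_prefix]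
        exact h ▸ List.take_prefix 3 (w.drop i)
      have hnot2y : (w.drop i).take 2 ≠ ['y','e'] := by
        intro h; apply h3; rw [List.isPrefixOf_iff_prefix]
        exact h ▸ List.take_prefix 2 (w.drop i)
      have hnot3w : (w.drop i).take 3 ≠ ['w','o','o'] := by
        intro h; apply h4; rw [List.isPrefixOf_iff_prefix]
        exact h ▸ List.take_prefix 3 (w.drop i)
      have hnot2m : (w.drop i).take 2 ≠ ['m','a'] := by
        intro h; apply h5; rw [List.isPrefixOf_iff_prefix]
        exact h ▸ List.take_prefix 2 (w.drop i)
      conv_rhs => rw [ayaWhileA]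
      simp [hne, hnot3a, hnot2y, hnot3w, hnot2m]
  | case6 i h =>
      have : w.drop i = [] := List.drop_eq_nil_of_le (by omega)
      rw [this, ayaWhileA]
      simp

theorem foldl_count (l : List String) (acc : Int) :
    l.foldl (fun answer bab =>
      if ayaWhileA bab.toList = [] then answer + 1 else answer) acc
    = acc + (l.countP (fun w => okB w.toList 0) : Int) := by
  induction l generalizing acc with
  | nil => simp
  | cons x xs ih =>
      rw [List.foldl_cons, ih, List.countP_cons]
      have := okB_eq_ayaWhileA x.toList 0
      by_cases h : ayaWhileA x.toList = []
      · simp [h] at this ⊢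
        simp [this]
        ring
      · simp [h] at this ⊢
        simp [this]

-- ===== VERDICT (by name: the statement is the Claim_ definition above) =====
theorem solution_spec : Claim_equal_solution := by
  intro babbling _
  unfold Spec_solution solution solution_alt
  rw [foldl_count]
  simp
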